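-- pv_equiv track=rewrite | github.com/gmaterni/teimed | teimedlib/textentities.py | entity_liv
-- ===== SOURCE A (Python) =====
-- def entity_liv(text_lft):
--     """
--         utilizza ( ) a sniistra di s per stabilire
--         il livello di nidificazione
--     """
--     if text_lft.find('(') < 0:
--         return 0
--     liv = 0
--     for c in text_lft:
--         if c == '(':
--             liv += 1
--         elif c == ')':
--             liv -= 1
--     return liv
-- ===== SOURCE B (Python) =====
-- def entity_liv(text_lft):
--     if text_lft.find('(') < 0:
--         return 0
--     return len(text_lft.split('(')) - len(text_lft.split(')'))
-- ===== Notes on version B (the rewrite author's own statement) =====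
-- stated objective: alternative
-- what changed: Replaces the single branching loop maintaining a running counter with a split-based formulation: the string is split on '(' and on ')' and the lengths of the two fragment lists are subtracted (len(s.split(sep)) = occurrences of sep + 1, so the +1s cancel); A's no-'(' guard is kept verbatim.
import Mathlib
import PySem

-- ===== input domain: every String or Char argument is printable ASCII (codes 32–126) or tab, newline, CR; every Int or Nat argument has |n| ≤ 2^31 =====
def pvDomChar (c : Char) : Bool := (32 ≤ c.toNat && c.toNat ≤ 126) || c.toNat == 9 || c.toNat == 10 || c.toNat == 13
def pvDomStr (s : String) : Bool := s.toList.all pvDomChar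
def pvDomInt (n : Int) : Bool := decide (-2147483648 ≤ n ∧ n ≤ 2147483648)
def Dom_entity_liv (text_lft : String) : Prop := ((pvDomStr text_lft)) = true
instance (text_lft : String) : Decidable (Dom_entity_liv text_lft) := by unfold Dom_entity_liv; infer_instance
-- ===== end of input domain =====

-- B replaces A's branching accumulator loop with a split-based formulation: split on
-- '(' and on ')' and subtract the fragment-list lengths; A's no-'(' guard is kept.

-- ===== PORT A =====
def entity_liv (text_lft : String) : Int :=
  if PySem.Str.find text_lft "(" < 0 then 0
  else
    text_lft.toList.foldl
      (fun liv c => if c = '(' then liv + 1 else if c = ')' then liv - 1 else liv) 0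

-- ===== PORT B =====
-- the separators "(" and ")" are nonempty literals, so split? is always `some`
def entity_liv_alt (text_lft : String) : Int :=
  if PySem.Str.find text_lft "(" < 0 then 0
  else (((PySem.Str.split? text_lft "(").getD []).length : Int)
       - (((PySem.Str.split? text_lft ")").getD []).length : Int)

-- ===== PRECONDITION & SPEC =====
def Spec_entity_liv (text_lft : String) (out : Int) : Prop := out = entity_liv_alt text_lft
instance (text_lft : String) (out : Int) : Decidable (Spec_entity_liv text_lft out) := by unfold Spec_entity_liv; infer_instance

-- ===== CLAIM (what is proved, stated in full; the proofs are below) =====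
def Claim_equal_entity_liv : Prop := ∀ (text_lft : String), Dom_entity_liv text_lft → Spec_entity_liv text_lft (entity_liv text_lft)

-- ===== LEMMAS AND PROOFS =====

-- splitting on a single-character separator yields count + 1 fragments
theorem splitOn_go_single (c : Char) :
    ∀ (l : List Char) (fuel : Nat) (cur : List Char) (acc : List (List Char)),
      l.length ≤ fuel →
      (PySem.Chars.splitOn.go [c] fuel l cur acc).length = acc.length + 1 + l.count c := by
  intro l
  induction l with
  | nil =>
      intro fuel cur acc _
      cases fuel <;> simp [PySem.Chars.splitOn.go]
  | cons h t ih =>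
      intro fuel cur acc hf
      cases fuel with
      | zero => simp at hf
      | succ f =>
          simp only [List.length_cons, Nat.succ_le_succ_iff] at hf
          simp only [PySem.Chars.splitOn.go, List.isPrefixOf, List.count_cons]
          by_cases hc : c = h
          · subst hc
            simp only [BEq.rfl, Bool.true_and, if_true, List.length_singleton,
              List.drop_succ_cons, List.drop_zero]
            rw [ih f [] (cur.reverse :: acc) hf]
            simp [Nat.add_comm, Nat.add_left_comm]
          · have e1 : (c == h) = false := by simp [hc]
            have e2 : (h == c) = false := by simp [Ne.symm hc]
            simp only [e1, Bool.false_and, if_neg Bool.false_ne_true]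
            rw [ih f (h :: cur) acc hf]
            simp [e2]

theorem split_single_len (s : List Char) (c : Char) :
    ((PySem.Chars.split? s [c]).getD []).length = s.count c + 1 := by
  simp only [PySem.Chars.split?, List.isEmpty_cons, if_neg Bool.false_ne_true,
    Option.getD_some, PySem.Chars.splitOn]
  rw [splitOn_go_single c s (s.length + 1) [] [] (Nat.le_succ _)]
  simp [Nat.add_comm]

-- A's accumulator loop computes count '(' minus count ')'
theorem loop_eq_counts (l : List Char) (a : Int) :
    l.foldl (fun liv c => if c = '(' then liv + 1 else if c = ')' then liv - 1 else liv) a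
      = a + (l.count '(' : Int) - (l.count ')' : Int) := by
  induction l generalizing a with
  | nil => simp
  | cons h t ih =>
      simp only [List.foldl_cons, ih, List.count_cons]
      by_cases h1 : h = '('
      · subst h1; simp; ring
      · by_cases h2 : h = ')'
        · subst h2; simp; ring
        · have e1 : (h == '(') = false := by simp [h1]
          have e2 : (h == ')') = false := by simp [h2]
          simp [h1, h2, e1, e2]

-- ===== VERDICT (by name: the statement is the Claim_ definition above) =====
theorem entity_liv_spec : Claim_equal_entity_liv := by
  intro s _
  unfold Spec_entity_liv entity_liv entity_liv_alt
  by_cases hg : PySem.Str.find s "(" < 0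
  · rw [if_pos hg, if_pos hg]
  · have h1 : ((PySem.Str.split? s "(").getD []).length = s.toList.count '(' + 1 := by
      have hsep : "(".toList = ['('] := rfl
      simp only [PySem.Str.split?, hsep, PySem.Chars.split?, List.isEmpty_cons,
        if_neg Bool.false_ne_true, Option.map_some, Option.getD_some, List.length_map]
      have := split_single_len s.toList '('
      simpa [PySem.Chars.split?] using this
    have h2 : ((PySem.Str.split? s ")").getD []).length = s.toList.count ')' + 1 := by
      have hsep : ")".toList = [')'] := rfl
      simp only [PySem.Str.split?, hsep, PySem.Chars.split?, List.isEmpty_cons,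
        if_neg Bool.false_ne_true, Option.map_some, Option.getD_some, List.length_map]
      have := split_single_len s.toList ')'
      simpa [PySem.Chars.split?] using this
    rw [if_neg hg, if_neg hg, loop_eq_counts, h1, h2]
    push_cast
    ring
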